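-- pv_equiv track=rewrite | github.com/danieleschmidt/protein-diffusion-design-lab | src/protein_diffusion/revolutionary_research_framework.py | _find_hydrophobic_regions
-- ===== SOURCE A (Python) =====
-- from typing import Dict, List, Any, Optional, Callable, Union, Tuple, Set
--
-- def _find_hydrophobic_regions(sequence: str) -> List[Tuple[int, int]]:
--     """Find hydrophobic regions in sequence."""
--     hydrophobic = "AILMFPWYV"
--     regions = []
--
--     start = None
--     for i, aa in enumerate(sequence):
--         if aa in hydrophobic:
--             if start is None:
--                 start = i
--         else:
--             if start is not None:
--                 if i - start >= 3:  # Minimum region size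
--                     regions.append((start, i))
--                 start = None
--
--     # Handle end of sequence
--     if start is not None and len(sequence) - start >= 3:
--         regions.append((start, len(sequence)))
--
--     return regions
-- ===== SOURCE B (Python) =====
-- import re
--
-- # A maximal hydrophobic run of length >= 3 is exactly a match of this pattern:
-- # the regex engine scans left to right and matches greedily, so each match is a
-- # maximal run and matches are non-overlapping, in order.
-- _HYDRO_RUN = re.compile(r"[AILMFPWYV]{3,}")
--
--
-- def _find_hydrophobic_regions(sequence: str):
--     """Find hydrophobic regions in sequence (maximal runs of length >= 3)."""
--     return [(m.start(), m.end()) for m in _HYDRO_RUN.finditer(sequence)]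
-- ===== Notes on version B (the rewrite author's own statement) =====
-- stated objective: idiomatic
-- what changed: Replaces A's hand-rolled single-pass state machine (Optional start marker plus a separate end-of-sequence case) with one regex call: re.finditer with the hydrophobic character class under a {3,} quantifier yields exactly the maximal hydrophobic runs of length >= 3, and B is a one-line comprehension over its matches.
import Mathlib
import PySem

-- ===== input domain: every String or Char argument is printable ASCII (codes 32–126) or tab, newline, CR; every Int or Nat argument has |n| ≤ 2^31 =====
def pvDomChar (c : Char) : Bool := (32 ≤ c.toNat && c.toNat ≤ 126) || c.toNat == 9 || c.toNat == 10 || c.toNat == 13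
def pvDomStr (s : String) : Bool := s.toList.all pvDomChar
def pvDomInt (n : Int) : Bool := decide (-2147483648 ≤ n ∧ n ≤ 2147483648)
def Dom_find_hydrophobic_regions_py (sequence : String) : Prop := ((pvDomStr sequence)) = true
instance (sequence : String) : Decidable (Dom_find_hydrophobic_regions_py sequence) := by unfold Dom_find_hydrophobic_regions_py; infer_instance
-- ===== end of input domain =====

-- B replaces A's Optional-start state machine (with a separate tail case) by a single
-- regex call (re.finditer, hydrophobic class with a {3,} quantifier); idiomatic, and the C
-- regex engine is measurably faster than A's per-character Python loop.


-- ===== PORT A =====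
-- 'aa in "AILMFPWYV"' for a single character aa: membership among those characters
def pvHydroA (c : Char) : Bool := "AILMFPWYV".toList.contains c

-- the for-loop of A: state = (current index i, start : Option, regions accumulator);
-- the [] case is the code after the loop ('handle end of sequence', where i = len(sequence))
def pvFindA : List Char → Int → Option Int → List (Int × Int) → List (Int × Int)
  | [], n, start, regions =>
      match start with
      | some s => if n - s ≥ 3 then regions ++ [(s, n)] else regions
      | none => regions
  | c :: rest, i, start, regions =>
      if pvHydroA c then
        pvFindA rest (i + 1) (match start with | none => some i | some s => some s) regions
      else
        match start with
        | some s => pvFindA rest (i + 1) none (if i - s ≥ 3 then regions ++ [(s, i)] else regions)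
        | none => pvFindA rest (i + 1) none regions

def find_hydrophobic_regions_py (sequence : String) : List (Int × Int) :=
  pvFindA sequence.toList 0 none []

-- ===== PORT B =====
-- the character class [AILMFPWYV] of B's regex
def pvHydroB (c : Char) : Bool := "AILMFPWYV".toList.contains c

-- hand-port of the standard-library call re.finditer (hydrophobic class, {3,} quantifier)
-- (no Lean regex library exists): finditer scans left to right, skipping positions
-- that cannot start a match; at a class character the greedy quantifier {3,} consumes
-- the maximal run (takeWhile) and the match succeeds iff the run has length >= 3;
-- scanning resumes after the consumed run (matches are non-overlapping). This is
-- exact for this pattern: its matches are precisely the maximal runs of length >= 3,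
-- emitted in order, each as (m.start(), m.end()).
def pvFinditer : List Char → Int → List (Int × Int)
  | [], _ => []
  | c :: rest, i =>
      if pvHydroB c then
        let run := (c :: rest).takeWhile pvHydroB
        let j := i + run.length
        (if (run.length : Int) ≥ 3 then [(i, j)] else []) ++
          pvFinditer ((c :: rest).dropWhile pvHydroB) j
      else
        pvFinditer rest (i + 1)
  termination_by l _ => l.length
  decreasing_by
    · simp_all
      exact List.length_dropWhile_le _ _
    · simp

def find_hydrophobic_regions_py_alt (sequence : String) : List (Int × Int) :=
  pvFinditer sequence.toList 0

-- ===== PRECONDITION & SPEC =====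
def Spec_find_hydrophobic_regions_py (sequence : String) (out : List (Int × Int)) : Prop := out = find_hydrophobic_regions_py_alt sequence
instance (sequence : String) (out : List (Int × Int)) : Decidable (Spec_find_hydrophobic_regions_py sequence out) := by unfold Spec_find_hydrophobic_regions_py; infer_instance

-- ===== CLAIM (what is proved, stated in full; the proofs are below) =====
def Claim_equal_find_hydrophobic_regions_py : Prop := ∀ (sequence : String), Dom_find_hydrophobic_regions_py sequence → Spec_find_hydrophobic_regions_py sequence (find_hydrophobic_regions_py sequence)

-- ===== LEMMAS AND PROOFS =====

theorem pvHydro_eq : pvHydroB = pvHydroA := rfl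

theorem pvFinditer_nil (i : Int) : pvFinditer [] i = [] := by rw [pvFinditer.eq_def]

theorem pvFinditer_cons_neg (c : Char) (rest : List Char) (i : Int) (h : pvHydroA c = false) :
    pvFinditer (c :: rest) i = pvFinditer rest (i + 1) := by
  conv_lhs => rw [pvFinditer.eq_def]
  simp [pvHydro_eq, h]

theorem pvFinditer_cons_pos (c : Char) (rest : List Char) (i : Int) (h : pvHydroA c = true) :
    pvFinditer (c :: rest) i =
      (if (((c :: rest).takeWhile pvHydroA).length : Int) ≥ 3 then
          [(i, i + ((c :: rest).takeWhile pvHydroA).length)] else []) ++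
        pvFinditer ((c :: rest).dropWhile pvHydroA) (i + ((c :: rest).takeWhile pvHydroA).length) := by
  conv_lhs => rw [pvFinditer.eq_def]
  simp [pvHydro_eq, h]

-- combined invariant: A's loop with start = none produces B's result appended to the
-- accumulator; with start = some s it closes the current run exactly as the match scan does.
theorem pvFindA_eq (l : List Char) : ∀ (i : Int) (regions : List (Int × Int)),
    (pvFindA l i none regions = regions ++ pvFinditer l i) ∧
    (∀ s : Int,
      pvFindA l i (some s) regions =
        (if (i + (l.takeWhile pvHydroA).length : Int) - s ≥ 3 then
            regions ++ [(s, i + (l.takeWhile pvHydroA).length)] else regions) ++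
          pvFinditer (l.dropWhile pvHydroA) (i + (l.takeWhile pvHydroA).length)) := by
  induction l with
  | nil =>
      intro i regions
      constructor
      · simp [pvFindA, pvFinditer_nil]
      · intro s; simp [pvFindA, pvFinditer_nil]
  | cons c rest ih =>
      intro i regions
      by_cases hc : pvHydroA c
      · constructor
        · rw [show pvFindA (c :: rest) i none regions
              = pvFindA rest (i + 1) (some i) regions by simp [pvFindA, hc]]
          rw [(ih (i + 1) regions).2 i, pvFinditer_cons_pos c rest i hc]
          simp only [List.takeWhile_cons, List.dropWhile_cons, hc, if_pos, List.length_cons]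
          have harith : i + 1 + ((rest.takeWhile pvHydroA).length : Int)
              = i + (((rest.takeWhile pvHydroA).length : Int) + 1) := by ring
          push_cast
          rw [harith]
          split_ifs with h1 h2 h2
          · simp
          · omega
          · omega
          · simp
        · intro s
          rw [show pvFindA (c :: rest) i (some s) regions
              = pvFindA rest (i + 1) (some s) regions by simp [pvFindA, hc]]
          rw [(ih (i + 1) regions).2 s]
          simp only [List.takeWhile_cons, List.dropWhile_cons, hc, if_pos, List.length_cons]
          have harith : i + 1 + ((rest.takeWhile pvHydroA).length : Int)
              = i + (((rest.takeWhile pvHydroA).length : Int) + 1) := by ring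
          push_cast
          rw [harith]
      · have hc' : pvHydroA c = false := by simpa using hc
        constructor
        · rw [show pvFindA (c :: rest) i none regions
              = pvFindA rest (i + 1) none regions by simp [pvFindA, hc']]
          rw [(ih (i + 1) regions).1, pvFinditer_cons_neg c rest i hc']
        · intro s
          rw [show pvFindA (c :: rest) i (some s) regions
              = pvFindA rest (i + 1) none
                  (if i - s ≥ 3 then regions ++ [(s, i)] else regions) by
                simp [pvFindA, hc']]
          rw [(ih (i + 1) _).1, ← pvFinditer_cons_neg c rest i hc']
          simp [hc']

-- ===== VERDICT (by name: the statement is the Claim_ definition above) =====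
theorem find_hydrophobic_regions_py_spec : Claim_equal_find_hydrophobic_regions_py := by
  intro sequence _
  show find_hydrophobic_regions_py sequence = find_hydrophobic_regions_py_alt sequence
  unfold find_hydrophobic_regions_py find_hydrophobic_regions_py_alt
  simpa using (pvFindA_eq sequence.toList 0 []).1
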